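-- pv_equiv track=rewrite | github.com/AlinCqe/Categori-Emag | utils.py | find_insert_row
-- ===== SOURCE A (Python) =====
-- def find_insert_row(rows, category):
--     last_match = None
--
--     for i, row in enumerate(rows, start=1):
--         if row and row["category"] == category:
--             last_match = i
--
--     if last_match:
--         return last_match + 1
--     else:
--         return len(rows) + 1
-- ===== SOURCE B (Python) =====
-- def find_insert_row(rows, category):
--     for i in range(len(rows), 0, -1):
--         row = rows[i - 1]
--         if row and row["category"] == category:
--             return i + 1
--     return len(rows) + 1
-- ===== Notes on version B (the rewrite author's own statement) =====
-- stated objective: alternative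
-- what changed: Replaces the forward full pass with a last_match accumulator by a backward scan that returns immediately at the last matching row.
import Mathlib
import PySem

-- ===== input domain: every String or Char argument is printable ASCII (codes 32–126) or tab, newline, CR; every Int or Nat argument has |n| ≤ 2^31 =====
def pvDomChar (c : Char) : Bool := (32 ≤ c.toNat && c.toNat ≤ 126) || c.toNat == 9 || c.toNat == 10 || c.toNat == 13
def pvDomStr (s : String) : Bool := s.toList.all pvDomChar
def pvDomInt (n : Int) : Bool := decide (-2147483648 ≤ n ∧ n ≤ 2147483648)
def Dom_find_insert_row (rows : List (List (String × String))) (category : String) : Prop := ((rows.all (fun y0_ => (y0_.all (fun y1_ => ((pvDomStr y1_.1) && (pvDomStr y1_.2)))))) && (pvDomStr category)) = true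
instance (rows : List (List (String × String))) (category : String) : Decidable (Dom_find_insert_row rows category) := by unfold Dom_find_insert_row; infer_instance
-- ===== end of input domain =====

-- B is a backward scan with early exit at the last matching row, instead of A's
-- forward full pass carrying a last_match accumulator.  Equivalence of RETURN values.

-- ===== PORT A =====
-- row["category"] raises KeyError when the key is missing; Pre_ excludes that, so
-- here a missing key simply fails the comparison (nothing is claimed outside Pre_).
-- last_match is None or ≥ 1 (enumerate starts at 1), so Python truthiness = isSome.
def find_insert_row (rows : List (List (String × String))) (category : String) : Int :=
  let last_match : Option Int :=
    (PySem.List.enumerate rows 1).foldl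
      (fun acc p =>
        if !p.2.isEmpty && (PySem.Dict.get? (PySem.Dict.mk p.2) "category" == some category) then some p.1 else acc)
      none
  match last_match with
  | some m => m + 1
  | none => (rows.length : Int) + 1

-- ===== PORT B =====
-- Source B's loop 'for i in range(len(rows), 0, -1)' reading rows[i-1]: structural
-- recursion on the reversed list, i counting down; returns some (i+1) on the first hit.
def fiAuxB (category : String) : List (List (String × String)) → Int → Option Int
  | [], _ => none
  | row :: rest, i =>
    if !row.isEmpty && (PySem.Dict.get? (PySem.Dict.mk row) "category" == some category) then some (i + 1)
    else fiAuxB category rest (i - 1)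

def find_insert_row_alt (rows : List (List (String × String))) (category : String) : Int :=
  match fiAuxB category rows.reverse (rows.length : Int) with
  | some v => v
  | none => (rows.length : Int) + 1

-- ===== PRECONDITION & SPEC =====
-- Pre_ excludes exactly the inputs on which A raises KeyError: a non-empty row dict
-- without the key "category".
def Pre_find_insert_row (rows : List (List (String × String))) (category : String) : Prop :=
  ∀ row ∈ rows, row = [] ∨ (PySem.Dict.get? (PySem.Dict.mk row) "category").isSome = true
instance (rows : List (List (String × String))) (category : String) : Decidable (Pre_find_insert_row rows category) := by unfold Pre_find_insert_row; infer_instance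
def pvWitness_find_insert_row : (List (List (String × String))) × String :=
  ([[("category", "a")], [], [("category", "b")]], "a")

def Spec_find_insert_row (rows : List (List (String × String))) (category : String) (out : Int) : Prop := out = find_insert_row_alt rows category
instance (rows : List (List (String × String))) (category : String) (out : Int) : Decidable (Spec_find_insert_row rows category out) := by unfold Spec_find_insert_row; infer_instance

-- ===== CLAIM (what is proved, stated in full; the proofs are below) =====
def Claim_equal_find_insert_row : Prop := ∀ (rows : List (List (String × String))) (category : String), Dom_find_insert_row rows category → Pre_find_insert_row rows category → Spec_find_insert_row rows category (find_insert_row rows category)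

-- ===== LEMMAS AND PROOFS =====

-- the match predicate both ports test
def pvHit (category : String) (row : List (String × String)) : Bool :=
  !row.isEmpty && (PySem.Dict.get? (PySem.Dict.mk row) "category" == some category)

theorem fiAuxB_append (category : String) (xs : List (List (String × String)))
    (r : List (String × String)) (i : Int) :
    fiAuxB category (xs ++ [r]) i =
      match fiAuxB category xs i with
      | some v => some v
      | none => if pvHit category r then some (i - xs.length + 1) else none := by
  induction xs generalizing i with
  | nil =>
    simp only [List.nil_append, fiAuxB, pvHit, List.length_nil, Int.natCast_zero, sub_zero]
  | cons x xs ih =>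
    simp only [List.cons_append, fiAuxB]
    by_cases h : (!x.isEmpty && (PySem.Dict.get? (PySem.Dict.mk x) "category" == some category)) = true
    · simp [h]
    · rw [if_neg h, if_neg h, ih]
      have e : i - 1 - (xs.length : Int) + 1 = i - ((x :: xs).length : Int) + 1 := by
        simp; ring
      rw [e]

theorem foldl_eq_fiAuxB (category : String) (rows : List (List (String × String)))
    (start : Int) (acc : Option Int) :
    (PySem.List.enumerate rows start).foldl
      (fun acc p =>
        if !p.2.isEmpty && (PySem.Dict.get? (PySem.Dict.mk p.2) "category" == some category) then some p.1 else acc)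
      acc =
    (match fiAuxB category rows.reverse (start - 1 + rows.length) with
     | some v => some (v - 1)
     | none => acc) := by
  induction rows generalizing start acc with
  | nil => simp [fiAuxB, PySem.List.enumerate_nil]
  | cons r rs ih =>
    rw [PySem.List.enumerate_cons, List.foldl_cons, ih]
    have hrev : (r :: rs).reverse = rs.reverse ++ [r] := by simp
    rw [hrev, fiAuxB_append]
    have hlen : start - 1 + ((r :: rs).length : Int) = start + 1 - 1 + rs.length := by
      simp only [List.length_cons]; push_cast; ring
    rw [hlen]
    cases hF : fiAuxB category rs.reverse (start + 1 - 1 + rs.length) with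
    | some v => rfl
    | none =>
      simp only
      by_cases h : pvHit category r = true
      · have h' := h
        simp only [pvHit] at h'
        rw [if_pos h, if_pos h']
        have e : start + 1 - 1 + (rs.length : Int) - rs.reverse.length + 1 - 1 = start := by
          simp
        simp only []
        rw [e]
      · have h' : (!r.isEmpty && (PySem.Dict.get? (PySem.Dict.mk r) "category" == some category)) = false := by
          simpa [pvHit] using h
        rw [if_neg h, if_neg (by simp [h'] : ¬ (!(start, r).2.isEmpty && (PySem.Dict.get? (PySem.Dict.mk (start, r).2) "category" == some category)) = true)]

-- ===== VERDICT (by name: the statement is the Claim_ definition above) =====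
theorem find_insert_row_spec : Claim_equal_find_insert_row := by
  intro rows category _ _
  unfold Spec_find_insert_row find_insert_row find_insert_row_alt
  simp only
  rw [foldl_eq_fiAuxB]
  have : (1 : Int) - 1 + rows.length = (rows.length : Int) := by ring
  rw [this]
  cases hF : fiAuxB category rows.reverse (rows.length : Int) with
  | some v => simp
  | none => simp
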